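-- pv_equiv track=rewrite | github.com/rakesh-050791/DS-Algo | Basics/July-2022/08-July-2022.py | solve
-- ===== SOURCE A (Python) =====
-- def solve(A):
--
--     arrLen = len(A)
--     prefixSum = [0] * arrLen
--     prefixSum[0] = A[0]
--
--     for i in range(1, arrLen):
--         prefixSum[i] = prefixSum[i-1] + A[i]
--
--     count = 0
--     minIndex = 0
--     for i in range(arrLen):
--
--         if i == 0:
--             leftSum = 0
--         else:
--             leftSum = prefixSum[i - 1]
--
--         rightSum = prefixSum[arrLen -1] - prefixSum[i]
--
--         if leftSum == rightSum:
--             count += 1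
--             minIndex = i
--
--     return minIndex if count > 0 else -1
-- ===== SOURCE B (Python) =====
-- def solve(A):
--     total = A[0]
--     for x in A[1:]:
--         total += x
--     right = 0
--     for i in range(len(A) - 1, -1, -1):
--         if total - right - A[i] == right:
--             return i
--         right += A[i]
--     return -1
-- ===== Notes on version B (the rewrite author's own statement) =====
-- stated objective: alternative
-- what changed: B replaces A's prefix-sum array and full forward index loop by a backward scan from the end with a running right-sum accumulator and an early return at the first (i.e. rightmost) equilibrium index, so no prefix array is built and the scan stops as soon as the answer is found.
import Mathlib
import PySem

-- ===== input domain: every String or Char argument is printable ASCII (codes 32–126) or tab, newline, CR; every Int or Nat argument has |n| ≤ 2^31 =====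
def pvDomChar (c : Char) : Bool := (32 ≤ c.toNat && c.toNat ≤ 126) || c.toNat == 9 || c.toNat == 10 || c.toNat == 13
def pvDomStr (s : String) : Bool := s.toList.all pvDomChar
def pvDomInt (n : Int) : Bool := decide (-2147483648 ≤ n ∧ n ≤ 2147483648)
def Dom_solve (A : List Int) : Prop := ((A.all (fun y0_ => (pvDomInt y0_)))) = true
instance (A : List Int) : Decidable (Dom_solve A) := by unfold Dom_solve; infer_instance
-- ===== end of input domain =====

-- B replaces A's prefix-sum array and full forward scan by a backward scan with a
-- running right-sum accumulator that returns early at the rightmost equilibrium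
-- index; objective: alternative (O(1) space, early exit).

-- ===== PORT A =====
def solve (A : List Int) : Int :=
  let arrLen : Int := PySem.List.len A
  -- prefixSum = [0] * arrLen; prefixSum[0] = A[0]
  let prefixSum : List Int :=
    PySem.List.pySetD (List.replicate A.length 0) 0 (PySem.List.pyGetD A 0 0)
  -- for i in range(1, arrLen): prefixSum[i] = prefixSum[i-1] + A[i]
  let prefixSum : List Int :=
    (PySem.List.pyRange 1 arrLen 1).foldl
      (fun ps i =>
        PySem.List.pySetD ps i (PySem.List.pyGetD ps (i - 1) 0 + PySem.List.pyGetD A i 0))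
      prefixSum
  -- count = 0; minIndex = 0; for i in range(arrLen): ...
  let st : Int × Int :=
    (PySem.List.pyRange 0 arrLen 1).foldl
      (fun (st : Int × Int) i =>
        let leftSum : Int := if i = 0 then 0 else PySem.List.pyGetD prefixSum (i - 1) 0
        let rightSum : Int :=
          PySem.List.pyGetD prefixSum (arrLen - 1) 0 - PySem.List.pyGetD prefixSum i 0
        if leftSum = rightSum then (st.1 + 1, i) else st)
      (0, 0)
  if st.1 > 0 then st.2 else -1

-- ===== PORT B =====
-- 'for i in range(len(A)-1, -1, -1): if …: return i; right += A[i]' as structural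
-- recursion over the countdown range list (the early 'return i' is the first branch).
def solveAltLoop (A : List Int) (total : Int) (right : Int) : List Int → Int
  | [] => -1
  | i :: rest =>
      if total - right - PySem.List.pyGetD A i 0 = right then i
      else solveAltLoop A total (right + PySem.List.pyGetD A i 0) rest

def solve_alt (A : List Int) : Int :=
  -- total = A[0]; for x in A[1:]: total += x
  let total : Int := (PySem.List.slice A (some 1) none).foldl (· + ·) (PySem.List.pyGetD A 0 0)
  solveAltLoop A total 0 (PySem.List.pyRange (PySem.List.len A - 1) (-1) (-1))

-- ===== PRECONDITION & SPEC =====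
-- Pre_ excludes only the empty list, on which A raises IndexError (A[0]).
def Pre_solve (A : List Int) : Prop := A ≠ []
instance (A : List Int) : Decidable (Pre_solve A) := by unfold Pre_solve; infer_instance

def pvWitness_solve : List Int := [1, 2, 3]

def Spec_solve (A : List Int) (out : Int) : Prop := out = solve_alt A
instance (A : List Int) (out : Int) : Decidable (Spec_solve A out) := by unfold Spec_solve; infer_instance

-- ===== CLAIM (what is proved, stated in full; the proofs are below) =====
def Claim_equal_solve : Prop := ∀ (A : List Int), Dom_solve A → Pre_solve A → Spec_solve A (solve A)

-- ===== LEMMAS AND PROOFS =====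

-- sum of the first m elements of A
def pvS (A : List Int) (m : Nat) : Int := (A.take m).foldl (· + ·) 0

-- last index m' < m satisfying the split condition pvS m' = pvS len - pvS (m'+1), or -1
def pvLast (A : List Int) : Nat → Int
  | 0 => -1
  | m + 1 => if pvS A m = pvS A A.length - pvS A (m + 1) then (m : Int) else pvLast A m

theorem pvS_succ (A : List Int) (m : Nat) (h : m < A.length) :
    pvS A (m + 1) = pvS A m + A.getD m 0 := by
  unfold pvS
  rw [List.take_add_one, List.foldl_append]
  simp [List.getD, List.getElem?_eq_getElem h]

theorem pvS_len (A : List Int) : pvS A A.length = A.foldl (· + ·) 0 := by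
  simp [pvS]

-- A's first loop, as a step function
def pvStepA (A : List Int) (ps : List Int) (i : Int) : List Int :=
  PySem.List.pySetD ps i (PySem.List.pyGetD ps (i - 1) 0 + PySem.List.pyGetD A i 0)

-- the prefix-sum list A's first loop builds
def pvPS (A : List Int) : List Int := (List.range A.length).map (fun k => pvS A (k + 1))

theorem pvPS_getD (A : List Int) (k : Nat) (hk : k < A.length) :
    (pvPS A).getD k 0 = pvS A (k + 1) := by
  simp [pvPS, List.getD, List.getElem?_map, List.getElem?_range hk]

-- invariant of A's first loop: after range(1, m), entries < m hold prefix sums, the rest are 0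
theorem pvPsChar (A : List Int) (m : Nat) (h1 : 1 ≤ m) (hm : m ≤ A.length) :
    (PySem.List.pyRange 1 (m : Int) 1).foldl (pvStepA A)
      (PySem.List.pySetD (List.replicate A.length 0) 0 (PySem.List.pyGetD A 0 0))
    = (List.range m).map (fun k => pvS A (k + 1)) ++ List.replicate (A.length - m) 0 := by
  induction m with
  | zero => omega
  | succ m ih =>
    rcases Nat.eq_or_lt_of_le h1 with h1' | hm1
    · -- m + 1 = 1, i.e. m = 0
      have hm0 : m = 0 := by omega
      subst hm0
      have hn : 0 < A.length := by omega
      rw [show ((1:Nat) : Int) = 1 by norm_num, PySem.List.pyRange_one_eq_nil le_rfl]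
      obtain ⟨x, xs, rfl⟩ : ∃ x xs, A = x :: xs := by
        cases A with
        | nil => simp at hn
        | cons x xs => exact ⟨x, xs, rfl⟩
      simp [List.foldl_nil, PySem.List.pySetD_of_nonneg, PySem.List.pyGetD_zero_cons,
        List.replicate_succ, pvS]
    · -- 1 ≤ m
      have hmn : m < A.length := by omega
      have hr : PySem.List.pyRange 1 ((m+1 : Nat) : Int) 1
          = PySem.List.pyRange 1 (m : Int) 1 ++ [(m : Int)] := by
        push_cast
        exact PySem.List.pyRange_one_succ_right (by exact_mod_cast Nat.one_le_iff_ne_zero.mpr (by omega))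
      rw [hr, List.foldl_append, ih (by omega) (by omega), List.foldl_cons, List.foldl_nil]
      unfold pvStepA
      have hcast : ((m : Int) - 1) = ((m - 1 : Nat) : Int) := by omega
      rw [hcast, PySem.List.pySetD_natCast, PySem.List.pyGetD_natCast, PySem.List.pyGetD_natCast]
      have hlen : ((List.range m).map (fun k => pvS A (k + 1))).length = m := by simp
      have hget1 : (((List.range m).map (fun k => pvS A (k + 1))) ++ List.replicate (A.length - m) 0).getD (m-1) 0
          = pvS A m := by
        rw [List.getD_append _ _ _ _ (by omega)]
        have : m - 1 < m := by omega
        simp [List.getD, List.getElem?_map, List.getElem?_range this]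
        congr 1
        omega
      rw [hget1]
      rw [List.set_append]
      rw [if_neg (by omega)]
      have hrep : A.length - m = (A.length - (m+1)) + 1 := by omega
      rw [hrep, List.replicate_succ, hlen]
      simp only [Nat.sub_self, List.set_cons_zero]
      rw [List.range_succ, List.map_append]
      rw [← pvS_succ A m hmn]
      simp

-- A's second loop, as a step function (prefixSum already identified as pvPS A)
def pvStep2 (A : List Int) (st : Int × Int) (i : Int) : Int × Int :=
  let leftSum : Int := if i = 0 then 0 else PySem.List.pyGetD (pvPS A) (i - 1) 0
  let rightSum : Int :=
    PySem.List.pyGetD (pvPS A) ((A.length : Int) - 1) 0 - PySem.List.pyGetD (pvPS A) i 0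
  if leftSum = rightSum then (st.1 + 1, i) else st

theorem pvStep2_eq (A : List Int) (hA : A ≠ []) (st : Int × Int) (m : Nat) (hm : m < A.length) :
    pvStep2 A st (m : Int)
      = if pvS A m = pvS A A.length - pvS A (m + 1) then (st.1 + 1, (m : Int)) else st := by
  have hn : 1 ≤ A.length := List.length_pos_iff.mpr hA
  unfold pvStep2
  have h1 : ((A.length : Int) - 1) = ((A.length - 1 : Nat) : Int) := by omega
  have h2 : (pvPS A).getD (A.length - 1) 0 = pvS A A.length := by
    rw [pvPS_getD A _ (by omega)]
    congr 1
    omega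
  rw [h1, PySem.List.pyGetD_natCast, h2, PySem.List.pyGetD_natCast, pvPS_getD A m hm]
  have hleft : (if (m : Int) = 0 then 0 else PySem.List.pyGetD (pvPS A) ((m : Int) - 1) 0)
      = pvS A m := by
    by_cases h0 : m = 0
    · subst h0; simp [pvS]
    · rw [if_neg (by exact_mod_cast h0)]
      have : ((m : Int) - 1) = ((m - 1 : Nat) : Int) := by omega
      rw [this, PySem.List.pyGetD_natCast, pvPS_getD A _ (by omega)]
      congr 1
      omega
  rw [hleft]

-- invariant of A's second loop: count is the number of matches so far, minIndex the last match
theorem pvFoldA (A : List Int) (hA : A ≠ []) (m : Nat) (hm : m ≤ A.length) :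
    0 ≤ ((PySem.List.pyRange 0 (m : Int) 1).foldl (pvStep2 A) (0, 0)).1 ∧
    (((PySem.List.pyRange 0 (m : Int) 1).foldl (pvStep2 A) (0, 0)).1 = 0 →
      ((PySem.List.pyRange 0 (m : Int) 1).foldl (pvStep2 A) (0, 0)).2 = 0 ∧ pvLast A m = -1) ∧
    (0 < ((PySem.List.pyRange 0 (m : Int) 1).foldl (pvStep2 A) (0, 0)).1 →
      ((PySem.List.pyRange 0 (m : Int) 1).foldl (pvStep2 A) (0, 0)).2 = pvLast A m) := by
  induction m with
  | zero =>
    rw [show ((0:Nat) : Int) = 0 by norm_num, PySem.List.pyRange_one_eq_nil le_rfl]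
    simp [pvLast]
  | succ m ih =>
    have hmn : m < A.length := by omega
    obtain ⟨ih1, ih2, ih3⟩ := ih (by omega)
    have hr : PySem.List.pyRange 0 ((m+1 : Nat) : Int) 1
        = PySem.List.pyRange 0 (m : Int) 1 ++ [(m : Int)] := by
      push_cast
      exact PySem.List.pyRange_one_succ_right (by positivity)
    rw [hr, List.foldl_append, List.foldl_cons, List.foldl_nil,
      pvStep2_eq A hA _ m hmn]
    unfold pvLast
    split_ifs with hc
    · refine ⟨by omega, by omega, fun _ => rfl⟩
    · exact ⟨ih1, ih2, ih3⟩

theorem solveA_eq (A : List Int) (hA : A ≠ []) : solve A = pvLast A A.length := by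
  have hn : 1 ≤ A.length := List.length_pos_iff.mpr hA
  have hps' : (PySem.List.pyRange 1 (A.length : Int) 1).foldl
      (fun ps i =>
        PySem.List.pySetD ps i (PySem.List.pyGetD ps (i - 1) 0 + PySem.List.pyGetD A i 0))
      (PySem.List.pySetD (List.replicate A.length 0) 0 (PySem.List.pyGetD A 0 0)) = pvPS A := by
    have e : (fun (ps : List Int) (i : Int) =>
        PySem.List.pySetD ps i (PySem.List.pyGetD ps (i - 1) 0 + PySem.List.pyGetD A i 0))
        = pvStepA A := rfl
    rw [e, pvPsChar A A.length hn le_rfl]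
    simp [pvPS]
  obtain ⟨h1, h2, h3⟩ := pvFoldA A hA A.length le_rfl
  simp only [solve, PySem.List.len_eq, hps']
  show (if ((PySem.List.pyRange 0 (A.length : Int) 1).foldl (pvStep2 A) (0, 0)).1 > 0
      then ((PySem.List.pyRange 0 (A.length : Int) 1).foldl (pvStep2 A) (0, 0)).2 else -1)
      = pvLast A A.length
  set g := (PySem.List.pyRange 0 (A.length : Int) 1).foldl (pvStep2 A) (0, 0) with hg
  by_cases hpos : g.1 > 0
  · rw [if_pos hpos]
    exact h3 hpos
  · rw [if_neg hpos]
    have h0 : g.1 = 0 := by omega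
    exact ((h2 h0).2).symm

-- invariant of B's backward loop: starting at index m-1 with right = sum of A[m:],
-- the first equilibrium index found counting down is exactly the last one counting up
theorem pvLoopB (A : List Int) (m : Nat) (hm : m ≤ A.length) :
    solveAltLoop A (pvS A A.length) (pvS A A.length - pvS A m)
        (PySem.List.pyRange ((m : Int) - 1) (-1) (-1)) = pvLast A m := by
  induction m with
  | zero =>
    rw [PySem.List.pyRange_neg_one_eq_nil (by norm_num)]
    simp [solveAltLoop, pvLast]
  | succ m ih =>
    have hmn : m < A.length := by omega
    have hr : PySem.List.pyRange (((m+1 : Nat) : Int) - 1) (-1) (-1)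
        = (m : Int) :: PySem.List.pyRange ((m : Int) - 1) (-1) (-1) := by
      push_cast
      rw [show ((m : Int) + 1 - 1) = (m : Int) by ring]
      exact PySem.List.pyRange_neg_one_cons (by omega)
    rw [hr]
    unfold solveAltLoop
    rw [PySem.List.pyGetD_natCast]
    have hfix : pvS A A.length - (pvS A A.length - pvS A (m + 1)) - A.getD m 0 = pvS A m := by
      rw [pvS_succ A m hmn]; ring
    rw [hfix]
    unfold pvLast
    split_ifs with hc
    · rfl
    · have hright : pvS A A.length - pvS A (m + 1) + A.getD m 0 = pvS A A.length - pvS A m := by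
        rw [pvS_succ A m hmn]; ring
      rw [hright]
      exact ih (by omega)

theorem solveB_eq (A : List Int) (hA : A ≠ []) : solve_alt A = pvLast A A.length := by
  obtain ⟨x, xs, rfl⟩ : ∃ x xs, A = x :: xs := by
    cases A with
    | nil => exact absurd rfl hA
    | cons x xs => exact ⟨x, xs, rfl⟩
  have htot : (PySem.List.slice (x :: xs) (some 1) none).foldl (· + ·)
      (PySem.List.pyGetD (x :: xs) 0 0) = pvS (x :: xs) (x :: xs).length := by
    rw [PySem.List.slice_from_one, pvS_len]
    simp [PySem.List.pyGetD_zero_cons]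
  simp only [solve_alt, PySem.List.len_eq, htot]
  have h := pvLoopB (x :: xs) (x :: xs).length le_rfl
  rw [sub_self] at h
  exact h

-- ===== VERDICT (by name: the statement is the Claim_ definition above) =====
theorem solve_spec : Claim_equal_solve := by
  intro A _ hA
  unfold Spec_solve
  rw [solveA_eq A hA, solveB_eq A hA]
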